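-- pv_equiv track=rewrite | github.com/lucasmartino95/utn | ejercicios_utn/arrays_unidimensionales/ejercicio_08.py | reemplazar_nombre
-- ===== SOURCE A (Python) =====
-- def reemplazar_nombre(lista_nombres: list,
--                       nombre_antiguo: str,
--                       nombre_nuevo: str) -> int:
--
--     reemplazos = 0
--
--     for i in range(len(lista_nombres)):
--         if nombre_antiguo == lista_nombres[i]:
--             lista_nombres[i] = nombre_nuevo
--             reemplazos += 1
--
--     return reemplazos
-- ===== SOURCE B (Python) =====
-- def reemplazar_nombre(lista_nombres: list,
--                       nombre_antiguo: str,
--                       nombre_nuevo: str) -> int: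
--     reemplazos = lista_nombres.count(nombre_antiguo)
--     lista_nombres[:] = [nombre_nuevo if x == nombre_antiguo else x
--                         for x in lista_nombres]
--     return reemplazos
-- ===== Notes on version B (the rewrite author's own statement) =====
-- stated objective: idiomatic
-- what changed: The fused index loop that both counts and replaces is split into a counting pass via list.count followed by a comprehension rebuild assigned in place with slice assignment.
import Mathlib
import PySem

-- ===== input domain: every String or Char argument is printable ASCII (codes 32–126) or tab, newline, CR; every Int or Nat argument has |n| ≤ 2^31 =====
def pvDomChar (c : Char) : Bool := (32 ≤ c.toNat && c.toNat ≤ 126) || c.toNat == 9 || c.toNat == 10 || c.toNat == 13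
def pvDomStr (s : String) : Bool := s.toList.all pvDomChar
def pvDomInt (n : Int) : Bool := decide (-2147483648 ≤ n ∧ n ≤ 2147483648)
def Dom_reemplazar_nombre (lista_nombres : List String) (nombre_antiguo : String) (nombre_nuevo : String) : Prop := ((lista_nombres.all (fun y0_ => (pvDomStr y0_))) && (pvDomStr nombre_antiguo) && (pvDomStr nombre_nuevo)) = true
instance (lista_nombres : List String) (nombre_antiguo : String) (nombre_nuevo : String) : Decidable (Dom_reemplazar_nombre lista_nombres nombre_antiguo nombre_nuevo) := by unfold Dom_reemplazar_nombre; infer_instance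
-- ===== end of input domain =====

-- B replaces A's fused count-and-replace index loop by a separate counting pass
-- (list.count) followed by an in-place comprehension rewrite; return value only is
-- proved equal (both Pythons mutate the list identically).

-- ===== PORT A =====
def reemplazar_nombre (lista_nombres : List String) (nombre_antiguo : String) (nombre_nuevo : String) : Int :=
  -- for i in range(len(lista_nombres)): if nombre_antiguo == lista_nombres[i]: lista_nombres[i] = nombre_nuevo; reemplazos += 1
  ((PySem.List.pyRange 0 (lista_nombres.length : Int) 1).foldl
    (fun (st : List String × Int) i =>
      if nombre_antiguo == PySem.List.pyGetD st.1 i "" then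
        (PySem.List.pySetD st.1 i nombre_nuevo, st.2 + 1)
      else st)
    (lista_nombres, 0)).2

-- ===== PORT B =====
def reemplazar_nombre_alt (lista_nombres : List String) (nombre_antiguo : String) (nombre_nuevo : String) : Int :=
  -- reemplazos = lista_nombres.count(nombre_antiguo); the in-place comprehension
  -- rewrite is a side effect with no influence on the returned value
  (PySem.List.count lista_nombres nombre_antiguo : Int)

-- ===== PRECONDITION & SPEC =====
def Spec_reemplazar_nombre (lista_nombres : List String) (nombre_antiguo : String) (nombre_nuevo : String) (out : Int) : Prop := out = reemplazar_nombre_alt lista_nombres nombre_antiguo nombre_nuevo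
instance (lista_nombres : List String) (nombre_antiguo : String) (nombre_nuevo : String) (out : Int) : Decidable (Spec_reemplazar_nombre lista_nombres nombre_antiguo nombre_nuevo out) := by unfold Spec_reemplazar_nombre; infer_instance

-- ===== CLAIM (what is proved, stated in full; the proofs are below) =====
def Claim_equal_reemplazar_nombre : Prop := ∀ (lista_nombres : List String) (nombre_antiguo : String) (nombre_nuevo : String), Dom_reemplazar_nombre lista_nombres nombre_antiguo nombre_nuevo → Spec_reemplazar_nombre lista_nombres nombre_antiguo nombre_nuevo (reemplazar_nombre lista_nombres nombre_antiguo nombre_nuevo)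

-- ===== LEMMAS AND PROOFS =====

theorem pv_drop_set_of_lt {α : Type} (v : α) : ∀ (xs : List α) (i j : Nat), i < j →
    (xs.set i v).drop j = xs.drop j := by
  intro xs
  induction xs with
  | nil => intro i j _; simp
  | cons x xs ih =>
    intro i j h
    cases i with
    | zero => cases j with
      | zero => omega
      | succ j => simp
    | succ i => cases j with
      | zero => omega
      | succ j => simpa using ih i j (by omega)

theorem pv_loopA (antiguo nuevo : String) (L : Int) :
    ∀ (k : Nat) (n : Int) (cur : List String) (a : Int),
    0 ≤ n → n + k = L → (cur.length : Int) = L →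
    ((PySem.List.pyRange n L 1).foldl
      (fun (st : List String × Int) i =>
        if antiguo == PySem.List.pyGetD st.1 i "" then
          (PySem.List.pySetD st.1 i nuevo, st.2 + 1)
        else st)
      (cur, a)).2
    = a + ((cur.drop n.toNat).count antiguo : Int) := by
  intro k
  induction k with
  | zero =>
    intro n cur a hn hk hl
    rw [PySem.List.pyRange_one_eq_nil (by omega)]
    have : cur.drop n.toNat = [] := List.drop_eq_nil_of_le (by omega)
    simp [this]
  | succ k ih =>
    intro n cur a hn hk hl
    have hlt : n < L := by omega
    have hidx : n.toNat < cur.length := by omega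
    rw [PySem.List.pyRange_one_cons hlt, List.foldl_cons]
    have hget : PySem.List.pyGetD cur n "" = cur[n.toNat] := by
      rw [PySem.List.pyGetD_of_nonneg _ _ hn]
      exact List.getD_eq_getElem _ _ hidx
    have hdrop : cur.drop n.toNat = cur[n.toNat] :: cur.drop (n.toNat + 1) :=
      List.drop_eq_getElem_cons hidx
    have htn : (n + 1).toNat = n.toNat + 1 := by omega
    by_cases hc : antiguo = cur[n.toNat]
    · simp only [hget]
      rw [if_pos (by simp [hc]), PySem.List.pySetD_of_nonneg _ _ hn]
      rw [ih (n + 1) (cur.set n.toNat nuevo) (a + 1) (by omega) (by omega) (by simp; omega)]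
      rw [htn, pv_drop_set_of_lt nuevo cur n.toNat (n.toNat + 1) (by omega)]
      rw [hdrop, List.count_cons]
      simp [← hc]
      omega
    · have hbeq : (antiguo == cur[n.toNat]) = false := by
        simpa using hc
      simp only [hget, hbeq, Bool.false_eq_true, if_false]
      rw [ih (n + 1) cur a (by omega) (by omega) hl]
      rw [htn, hdrop, List.count_cons]
      have : (cur[n.toNat] == antiguo) = false := by
        simp; exact fun h => hc h.symm
      simp [this]

-- ===== VERDICT (by name: the statement is the Claim_ definition above) =====
theorem reemplazar_nombre_spec : Claim_equal_reemplazar_nombre := by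
  intro lista antiguo nuevo _
  unfold Spec_reemplazar_nombre reemplazar_nombre reemplazar_nombre_alt
  rw [pv_loopA antiguo nuevo (lista.length : Int) lista.length 0 lista 0
      le_rfl (by omega) rfl]
  simp [PySem.List.count_eq]
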